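-- pv_equiv track=rewrite | github.com/MonsieurNam/object_video_retrieval | query_library_v9.py | apply_post_processing
-- ===== SOURCE A (Python) =====
-- def apply_post_processing(result_dict: dict, max_gap: int = 20) -> dict:
--     if not result_dict: return {}
--
--     processed_dict = {}
--     for video, frames in result_dict.items():
--         if frames:
--             sorted_frames = sorted(frames)
--             processed_dict[video] = fill_gaps(sorted_frames, max_gap_size=max_gap)
--         else:
--             processed_dict[video] = []
--
--     return processed_dict
--
-- def fill_gaps(frame_list: list, max_gap_size: int = 15) -> list:
--     if len(frame_list) < 2:
--         return frame_list
--
--     filled_list = []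
--
--     # Sử dụng set để thêm và kiểm tra sự tồn tại nhanh hơn
--     frame_set = set(frame_list)
--     min_frame, max_frame = frame_list[0], frame_list[-1]
--
--     for frame_num in range(min_frame, max_frame + 1):
--         if frame_num in frame_set:
--             filled_list.append(frame_num)
--         else:
--             # Tìm frame trước và sau gần nhất trong set
--             prev_in_set = max([f for f in frame_set if f < frame_num], default=None)
--             next_in_set = min([f for f in frame_set if f > frame_num], default=None)
--
--             if prev_in_set is not None and next_in_set is not None:
--                 gap = next_in_set - prev_in_set
--                 if gap <= max_gap_size + 1:
--                     filled_list.append(frame_num)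
--
--     return filled_list
-- ===== SOURCE B (Python) =====
-- def apply_post_processing(result_dict: dict, max_gap: int = 20) -> dict:
--     # Single pass over the sorted distinct frames: each consecutive gap is filled
--     # wholesale when its span is <= max_gap + 1, instead of re-scanning the set
--     # for every frame number in range(min, max+1).
--     out = {}
--     for video, frames in result_dict.items():
--         u = sorted(set(frames))
--         res = []
--         for a, b in zip(u, u[1:]):
--             if b - a <= max_gap + 1:
--                 res.extend(range(a, b))
--             else:
--                 res.append(a)
--         if u:
--             res.append(u[-1])
--         out[video] = res
--     return out
-- ===== Notes on version B (the rewrite author's own statement) =====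
-- stated objective: faster
-- what changed: Per video, instead of scanning every integer in range(min,max+1) and recomputing the nearest previous/next set element for each missing one, B walks the sorted distinct frames once and emits each consecutive gap wholesale when its span is <= max_gap+1.
import Mathlib
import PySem

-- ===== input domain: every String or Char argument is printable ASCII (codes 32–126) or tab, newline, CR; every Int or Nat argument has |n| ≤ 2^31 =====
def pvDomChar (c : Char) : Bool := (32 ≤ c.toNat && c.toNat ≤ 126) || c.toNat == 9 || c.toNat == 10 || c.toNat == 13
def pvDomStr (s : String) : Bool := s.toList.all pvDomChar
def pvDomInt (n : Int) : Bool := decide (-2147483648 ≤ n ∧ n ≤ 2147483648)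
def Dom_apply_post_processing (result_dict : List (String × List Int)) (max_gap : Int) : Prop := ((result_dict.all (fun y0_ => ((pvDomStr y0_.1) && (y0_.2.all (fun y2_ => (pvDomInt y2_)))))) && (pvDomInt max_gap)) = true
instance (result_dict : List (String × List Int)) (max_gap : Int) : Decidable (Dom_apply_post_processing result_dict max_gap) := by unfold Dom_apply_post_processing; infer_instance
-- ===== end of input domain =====

-- B replaces A's per-video rescan of the whole frame set for every frame number in
-- range(min, max+1) by a single pass over the sorted distinct frames that emits each
-- consecutive gap wholesale when its span is ≤ max_gap + 1.

-- ===== PORT A =====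
-- helper fill_gaps: literal transliteration of A's fill_gaps.
-- The two pyGetD defaults are never used: the branch guarantees length ≥ 2.
def fill_gaps (frame_list : List Int) (max_gap_size : Int) : List Int :=
  if frame_list.length < 2 then frame_list
  else
    let frame_set : PySem.Set Int := PySem.Set.ofList frame_list
    let min_frame : Int := PySem.List.pyGetD frame_list 0 0
    let max_frame : Int := PySem.List.pyGetD frame_list (-1) 0
    (PySem.List.pyRange min_frame (max_frame + 1) 1).foldl
      (fun filled_list frame_num =>
        if PySem.Set.contains frame_set frame_num then filled_list ++ [frame_num]
        else
          -- max(comprehension, default=None) / min(..., default=None) → max? / min?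
          let prev_in_set := PySem.List.max? (frame_set.filter (fun f => decide (f < frame_num))) (fun x => x)
          let next_in_set := PySem.List.min? (frame_set.filter (fun f => decide (frame_num < f))) (fun x => x)
          match prev_in_set, next_in_set with
          | some p, some q => if q - p ≤ max_gap_size + 1 then filled_list ++ [frame_num] else filled_list
          | _, _ => filled_list)
      []

def apply_post_processing (result_dict : List (String × List Int)) (max_gap : Int) : List (String × List Int) :=
  if result_dict = [] then []
  else
    ((PySem.Dict.ofList result_dict).items.foldl
      (fun (processed : PySem.Dict String (List Int)) vf =>
        if vf.2 ≠ [] then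
          processed.insert vf.1 (fill_gaps (PySem.List.sorted vf.2 (fun x => x) false) max_gap)
        else
          processed.insert vf.1 [])
      PySem.Dict.empty).items

-- ===== PORT B =====
-- per-video body of B: one pass over consecutive pairs of u = sorted(set(frames)).
def fill_runs (u : List Int) (max_gap : Int) : List Int :=
  let res := (u.zip (u.drop 1)).foldl   -- zip(u, u[1:])
    (fun res ab =>
      if ab.2 - ab.1 ≤ max_gap + 1 then res ++ PySem.List.pyRange ab.1 ab.2 1
      else res ++ [ab.1])
    []
  if u = [] then res else res ++ [PySem.List.pyGetD u (-1) 0]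

def apply_post_processing_alt (result_dict : List (String × List Int)) (max_gap : Int) : List (String × List Int) :=
  ((PySem.Dict.ofList result_dict).items.foldl
    (fun (out : PySem.Dict String (List Int)) vf =>
      out.insert vf.1 (fill_runs (PySem.List.sorted (PySem.Set.ofList vf.2) (fun x => x) false) max_gap))
    PySem.Dict.empty).items

-- ===== PRECONDITION & SPEC =====
def Spec_apply_post_processing (result_dict : List (String × List Int)) (max_gap : Int) (out : List (String × List Int)) : Prop := out = apply_post_processing_alt result_dict max_gap
instance (result_dict : List (String × List Int)) (max_gap : Int) (out : List (String × List Int)) : Decidable (Spec_apply_post_processing result_dict max_gap out) := by unfold Spec_apply_post_processing; infer_instance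

-- ===== CLAIM (what is proved, stated in full; the proofs are below) =====
def Claim_equal_apply_post_processing : Prop := ∀ (result_dict : List (String × List Int)) (max_gap : Int), Dom_apply_post_processing result_dict max_gap → Spec_apply_post_processing result_dict max_gap (apply_post_processing result_dict max_gap)

-- ===== LEMMAS AND PROOFS =====

lemma pv_le_getLast {l : List Int} (hp : l.Pairwise (· ≤ ·)) (h : l ≠ []) :
    ∀ x ∈ l, x ≤ l.getLast h := by
  induction l with
  | nil => simp at h
  | cons a t ih =>
    intro x hx
    rcases List.mem_cons.1 hx with rfl | hx
    · cases t with
      | nil => simp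
      | cons b t' =>
        have := ih (List.pairwise_cons.1 hp).2 (by simp) b (by simp)
        have hab : x ≤ b := (List.pairwise_cons.1 hp).1 b (by simp)
        simpa [List.getLast] using le_trans hab this
    · cases t with
      | nil => simp at hx
      | cons b t' =>
        have := ih (List.pairwise_cons.1 hp).2 (by simp) x hx
        simpa [List.getLast] using this

lemma pv_lt_le_getLast {l : List Int} (hp : l.Pairwise (· < ·)) (h : l ≠ []) :
    ∀ x ∈ l, x ≤ l.getLast h :=
  pv_le_getLast (hp.imp (fun h => le_of_lt h)) h

lemma pv_foldl_min_eq (b : Int) (t : List Int) (h : ∀ x ∈ t, b ≤ x) :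
    t.foldl min b = b := by
  induction t with
  | nil => rfl
  | cons x t ih =>
    have : min b x = b := min_eq_left (h x (by simp))
    simp only [List.foldl_cons, this]
    exact ih (fun y hy => h y (by simp [hy]))

lemma pv_ofList_pairwise_lt {s : List Int} (hs : s.Pairwise (· ≤ ·)) :
    (PySem.Set.ofList s).Pairwise (· < ·) := by
  induction s using List.reverseRecOn with
  | nil => simp [PySem.Set.ofList_nil]
  | append_singleton xs x ih =>
    rw [PySem.Set.ofList_append_singleton, PySem.Set.add_eq_ite]
    have hxs : xs.Pairwise (· ≤ ·) := (List.pairwise_append.1 hs).1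
    have hle : ∀ y ∈ xs, y ≤ x := fun y hy => (List.pairwise_append.1 hs).2.2 y hy x (by simp)
    by_cases hx : x ∈ PySem.Set.ofList xs
    · simp [hx, ih hxs]
    · simp only [hx, if_false]
      rw [List.pairwise_append]
      refine ⟨ih hxs, by simp, ?_⟩
      intro y hy z hz
      rw [List.mem_singleton] at hz
      have hyx : y ≤ x := hle y ((PySem.Set.mem_ofList _ _).1 hy)
      have hne : y ≠ x := fun e => hx (e ▸ hy)
      omega

lemma pv_sortedSet_eq (frames : List Int) :
    PySem.List.sorted (PySem.Set.ofList frames) (fun x => x) false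
      = PySem.Set.ofList (PySem.List.sorted frames (fun x => x) false) := by
  apply PySem.List.sorted_eq_of_perm_of_pairwise_lt
  · apply (List.perm_ext_iff_of_nodup (PySem.Set.nodup_ofList _) (PySem.Set.nodup_ofList _)).2
    intro x
    simp [PySem.Set.mem_ofList, PySem.List.mem_sorted]
  · exact pv_ofList_pairwise_lt (by simpa using PySem.List.sorted_pairwise frames (fun x => x))

def pvQ (u : List Int) (g n : Int) : Bool :=
  PySem.Set.contains u n ||
    (match PySem.List.max? (u.filter (fun f => decide (f < n))) (fun x => x),
           PySem.List.min? (u.filter (fun f => decide (n < f))) (fun x => x) with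
     | some p, some q => decide (q - p ≤ g + 1)
     | _, _ => false)

lemma pvQ_gap (a b g n : Int) (t' : List Int) (hp : (a :: b :: t').Pairwise (· < ·))
    (h1 : a < n) (h2 : n < b) : pvQ (a :: b :: t') g n = decide (b - a ≤ g + 1) := by
  obtain ⟨ha, hp2⟩ := List.pairwise_cons.1 hp
  obtain ⟨hb, hp3⟩ := List.pairwise_cons.1 hp2
  have hab : a < b := ha b (by simp)
  have hnotmem : n ∉ (a :: b :: t') := by
    simp only [List.mem_cons]
    push Not
    refine ⟨by omega, by omega, fun hx => ?_⟩
    have := hb n hx; omega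
  have hcont : PySem.Set.contains (a :: b :: t') n = false := by
    rw [← Bool.not_eq_true, PySem.Set.contains_iff]; exact hnotmem
  have hflt : (a :: b :: t').filter (fun f => decide (f < n)) = [a] := by
    simp only [List.filter_cons, decide_eq_true_eq]
    rw [if_pos h1, if_neg (by omega)]
    congr 1
    rw [List.filter_eq_nil_iff]
    intro x hx
    have := hb x hx
    simp; omega
  have hfgt : (a :: b :: t').filter (fun f => decide (n < f)) = b :: t' := by
    simp only [List.filter_cons, decide_eq_true_eq]
    rw [if_neg (by omega), if_pos h2]
    congr 1
    rw [List.filter_eq_self]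
    intro x hx
    have := hb x hx
    simp; omega
  unfold pvQ
  rw [hcont, hflt, hfgt]
  rw [PySem.List.min?_id_cons, pv_foldl_min_eq b t' (fun x hx => le_of_lt (hb x hx))]
  simp [PySem.List.max?_id_cons]

lemma pvQ_shift (a b g n : Int) (t' : List Int) (hp : (a :: b :: t').Pairwise (· < ·))
    (hn : b ≤ n) : pvQ (a :: b :: t') g n = pvQ (b :: t') g n := by
  obtain ⟨ha, hp2⟩ := List.pairwise_cons.1 hp
  obtain ⟨hb, hp3⟩ := List.pairwise_cons.1 hp2
  have hab : a < b := ha b (by simp)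
  by_cases hmem : n ∈ (b :: t')
  · have h1 : PySem.Set.contains (a :: b :: t') n = true := by
      rw [PySem.Set.contains_iff]; simp [hmem]
    have h2 : PySem.Set.contains (b :: t') n = true := by
      rw [PySem.Set.contains_iff]; exact hmem
    unfold pvQ; rw [h1, h2]; simp
  · have hbn : b < n := by
      rcases lt_or_eq_of_le hn with h | h
      · exact h
      · exact absurd (h ▸ List.mem_cons_self) hmem
    have h1 : PySem.Set.contains (a :: b :: t') n = false := by
      rw [← Bool.not_eq_true, PySem.Set.contains_iff]
      intro hx
      rcases List.mem_cons.1 hx with rfl | hx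
      · omega
      · exact hmem hx
    have h2 : PySem.Set.contains (b :: t') n = false := by
      rw [← Bool.not_eq_true, PySem.Set.contains_iff]; exact hmem
    have hflt : (a :: b :: t').filter (fun f => decide (f < n))
        = a :: (b :: t').filter (fun f => decide (f < n)) := by
      simp only [List.filter_cons, decide_eq_true_eq]
      rw [if_pos (by omega)]
    have hfltb : (b :: t').filter (fun f => decide (f < n))
        = b :: t'.filter (fun f => decide (f < n)) := by
      simp only [List.filter_cons, decide_eq_true_eq]
      rw [if_pos (by omega)]
    have hmax : PySem.List.max? ((a :: b :: t').filter (fun f => decide (f < n))) (fun x => x)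
        = PySem.List.max? ((b :: t').filter (fun f => decide (f < n))) (fun x => x) := by
      rw [hflt, hfltb]
      rw [PySem.List.max?_id_cons, PySem.List.max?_id_cons]
      simp only [List.foldl_cons]
      rw [max_eq_right (le_of_lt hab)]
    have hfgt : (a :: b :: t').filter (fun f => decide (n < f))
        = (b :: t').filter (fun f => decide (n < f)) := by
      simp only [List.filter_cons, decide_eq_true_eq]
      rw [if_neg (by omega)]
    unfold pvQ
    rw [h1, h2, hmax, hfgt]

lemma pv_part1 (a b g : Int) (t' : List Int) (hp : (a :: b :: t').Pairwise (· < ·)) :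
    (PySem.List.pyRange a b 1).filter (pvQ (a :: b :: t') g)
      = if b - a ≤ g + 1 then PySem.List.pyRange a b 1 else [a] := by
  have hab : a < b := (List.pairwise_cons.1 hp).1 b (by simp)
  have hQa : pvQ (a :: b :: t') g a = true := by
    unfold pvQ
    have : PySem.Set.contains (a :: b :: t') a = true := by
      rw [PySem.Set.contains_iff]; simp
    rw [this]; simp
  rw [PySem.List.pyRange_one_cons hab]
  rw [List.filter_cons, if_pos hQa]
  have hrest : (PySem.List.pyRange (a+1) b 1).filter (pvQ (a :: b :: t') g)
      = (PySem.List.pyRange (a+1) b 1).filter (fun _ => decide (b - a ≤ g + 1)) := by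
    apply List.filter_congr
    intro n hn
    rw [PySem.List.mem_pyRange_one] at hn
    exact pvQ_gap a b g n t' hp (by omega) (by omega)
  rw [hrest]
  by_cases hg : b - a ≤ g + 1
  · rw [if_pos hg]
    simp only [hg, decide_true]
    rw [List.filter_true, ← PySem.List.pyRange_one_cons hab]
  · rw [if_neg hg]
    simp only [hg, decide_false]
    rw [List.filter_false]

lemma pv_core (g : Int) : ∀ (t : List Int) (a : Int), (a :: t).Pairwise (· < ·) →
    (PySem.List.pyRange a ((a :: t).getLast (by simp) + 1) 1).filter (pvQ (a :: t) g)
      = ((a :: t).zip t).flatMap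
          (fun ab => if ab.2 - ab.1 ≤ g + 1 then PySem.List.pyRange ab.1 ab.2 1 else [ab.1])
        ++ [(a :: t).getLast (by simp)] := by
  intro t
  induction t with
  | nil =>
    intro a _
    simp only [List.getLast_singleton, List.zip_nil_right, List.flatMap_nil, List.nil_append]
    rw [PySem.List.pyRange_one_singleton]
    simp only [List.filter_cons]
    have : pvQ [a] g a = true := by
      unfold pvQ
      have : PySem.Set.contains [a] a = true := by rw [PySem.Set.contains_iff]; simp
      rw [this]; simp
    rw [if_pos this]
    rfl
  | cons b t' ih =>
    intro a hp
    have hab : a < b := (List.pairwise_cons.1 hp).1 b (by simp)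
    have hp2 : (b :: t').Pairwise (· < ·) := (List.pairwise_cons.1 hp).2
    have hL : (a :: b :: t').getLast (by simp) = (b :: t').getLast (by simp) := by
      simp [List.getLast_cons]
    have hbL : b ≤ (b :: t').getLast (by simp) :=
      pv_lt_le_getLast hp2 (by simp) b (by simp)
    rw [hL]
    rw [PySem.List.pyRange_one_append a b ((b :: t').getLast (by simp) + 1)
      (le_of_lt hab) (by omega)]
    rw [List.filter_append]
    have h2 : (PySem.List.pyRange b ((b :: t').getLast (by simp) + 1) 1).filter (pvQ (a :: b :: t') g)
        = (PySem.List.pyRange b ((b :: t').getLast (by simp) + 1) 1).filter (pvQ (b :: t') g) := by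
      apply List.filter_congr
      intro n hn
      rw [PySem.List.mem_pyRange_one] at hn
      exact pvQ_shift a b g n t' hp hn.1
    rw [h2, ih b hp2, pv_part1 a b g t' hp]
    simp only [List.zip_cons_cons, List.flatMap_cons, List.append_assoc]

lemma pv_body_eq (u : List Int) (g : Int) (acc : List Int) (n : Int) :
    (if PySem.Set.contains u n then acc ++ [n]
     else
       match PySem.List.max? (u.filter (fun f => decide (f < n))) (fun x => x),
             PySem.List.min? (u.filter (fun f => decide (n < f))) (fun x => x) with
       | some p, some q => if q - p ≤ g + 1 then acc ++ [n] else acc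
       | _, _ => acc)
      = if pvQ u g n then acc ++ [n] else acc := by
  unfold pvQ
  by_cases hc : PySem.Set.contains u n
  · have hm := (PySem.Set.contains_iff u n).1 hc
    simp [hm]
  · simp only [hc, Bool.false_or]
    rcases hm : PySem.List.max? (u.filter (fun f => decide (f < n))) (fun x => x) with _ | p
    · rcases hn2 : PySem.List.min? (u.filter (fun f => decide (n < f))) (fun x => x) with _ | q <;> simp
    · rcases hn2 : PySem.List.min? (u.filter (fun f => decide (n < f))) (fun x => x) with _ | q
      · simp
      · by_cases hg : q - p ≤ g + 1 <;> simp [hg]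

lemma pv_runs_body (g : Int) (acc : List Int) (ab : Int × Int) :
    (if ab.2 - ab.1 ≤ g + 1 then acc ++ PySem.List.pyRange ab.1 ab.2 1 else acc ++ [ab.1])
      = acc ++ (if ab.2 - ab.1 ≤ g + 1 then PySem.List.pyRange ab.1 ab.2 1 else [ab.1]) := by
  by_cases h : ab.2 - ab.1 ≤ g + 1 <;> simp [h]

lemma pv_Aloop (u : List Int) (g : Int) (l : List Int) :
    l.foldl
      (fun filled_list frame_num =>
        if PySem.Set.contains u frame_num then filled_list ++ [frame_num]
        else
          match PySem.List.max? (u.filter (fun f => decide (f < frame_num))) (fun x => x),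
                PySem.List.min? (u.filter (fun f => decide (frame_num < f))) (fun x => x) with
          | some p, some q => if q - p ≤ g + 1 then filled_list ++ [frame_num] else filled_list
          | _, _ => filled_list)
      [] = l.filter (pvQ u g) := by
  trans (l.foldl (fun acc n => if pvQ u g n then acc ++ [n] else acc) [])
  · exact PySem.List.foldl_congr_mem l _ _ [] (fun acc n _ => pv_body_eq u g acc n)
  · rw [PySem.List.foldl_append_if_eq_filter]
    simp

lemma pv_Bloop (g : Int) (l : List (Int × Int)) :
    l.foldl
      (fun res ab =>
        if ab.2 - ab.1 ≤ g + 1 then res ++ PySem.List.pyRange ab.1 ab.2 1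
        else res ++ [ab.1])
      [] = l.flatMap (fun ab => if ab.2 - ab.1 ≤ g + 1 then PySem.List.pyRange ab.1 ab.2 1 else [ab.1]) := by
  trans (l.foldl (fun res ab => res ++ (if ab.2 - ab.1 ≤ g + 1 then PySem.List.pyRange ab.1 ab.2 1 else [ab.1])) [])
  · exact PySem.List.foldl_congr_mem l _ _ [] (fun acc ab _ => pv_runs_body g acc ab)
  · rw [PySem.List.foldl_append_eq_flatMap]
    simp

lemma pv_fill_eq (frames : List Int) (g : Int) :
    (if frames ≠ [] then fill_gaps (PySem.List.sorted frames (fun x => x) false) g else ([] : List Int))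
      = fill_runs (PySem.List.sorted (PySem.Set.ofList frames) (fun x => x) false) g := by
  by_cases hf : frames = []
  · subst hf; rfl
  · rw [if_pos hf, pv_sortedSet_eq]
    have hs_le : (PySem.List.sorted frames (fun x => x) false).Pairwise (· ≤ ·) := by
      simpa using PySem.List.sorted_pairwise frames (fun x => x)
    have hs_ne : PySem.List.sorted frames (fun x => x) false ≠ [] := by
      rw [Ne, PySem.List.sorted_eq_nil_iff]; exact hf
    generalize hsgen : PySem.List.sorted frames (fun x => x) false = s at hs_le hs_ne ⊢
    clear hsgen hf frames
    have hu_lt : (PySem.Set.ofList s).Pairwise (· < ·) := pv_ofList_pairwise_lt hs_le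
    obtain ⟨x, xs, rfl⟩ := List.exists_cons_of_ne_nil hs_ne
    unfold fill_gaps
    by_cases hlen : (x :: xs).length < 2
    · have hxs : xs = [] := by
        cases xs with
        | nil => rfl
        | cons y ys => simp at hlen
      subst hxs
      rw [if_pos hlen]
      rfl
    · rw [if_neg hlen]
      simp only []
      -- name the set and its cons decomposition
      rw [PySem.Set.ofList_cons] at hu_lt ⊢
      generalize hud : PySem.Set.discard (PySem.Set.ofList xs) x = u' at hu_lt ⊢
      have hu_ne : (x :: u') ≠ [] := by simp
      -- indices
      have hmin : PySem.List.pyGetD (x :: xs) (0 : Int) 0 = x := PySem.List.pyGetD_zero_cons _ _ _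
      have hmaxs : PySem.List.pyGetD (x :: xs) (-1 : Int) 0 = (x :: xs).getLast (by simp) :=
        PySem.List.pyGetD_neg_one (x :: xs) 0 (by simp)
      have humem : ∀ y, y ∈ x :: u' ↔ y ∈ x :: xs := by
        intro y
        rw [← hud, ← PySem.Set.ofList_cons]
        exact PySem.Set.mem_ofList _ _
      have hgl : (x :: u').getLast (by simp) = (x :: xs).getLast (by simp) := by
        apply le_antisymm
        · exact pv_le_getLast hs_le (by simp) _ ((humem _).1 (List.getLast_mem _))
        · exact pv_lt_le_getLast hu_lt (by simp) _ ((humem _).2 (List.getLast_mem _))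
      rw [hmin, hmaxs, ← hgl]
      rw [pv_Aloop (x :: u') g]
      rw [pv_core g u' x hu_lt]
      unfold fill_runs
      rw [if_neg hu_ne]
      rw [pv_Bloop g]
      rw [PySem.List.pyGetD_neg_one (x :: u') 0 (by simp)]
      simp

theorem apply_post_processing_spec : Claim_equal_apply_post_processing := by
  intro rd g _
  unfold Spec_apply_post_processing apply_post_processing apply_post_processing_alt
  by_cases h : rd = []
  · subst h; rfl
  · rw [if_neg h]
    refine congrArg PySem.Dict.items
      (PySem.List.foldl_congr_mem _ _ _ PySem.Dict.empty (fun d vf _ => ?_))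
    by_cases hv : vf.2 = []
    · rw [if_neg (by simpa using hv)]
      have hfe := pv_fill_eq vf.2 g
      rw [if_neg (by simpa using hv)] at hfe
      rw [← hfe]
    · rw [if_pos hv]
      have hfe := pv_fill_eq vf.2 g
      rw [if_pos hv] at hfe
      rw [hfe]
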